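-- pv_equiv track=rewrite | github.com/qrjhamron/con-bot | api/_conn.py | resolve_unit_type
-- ===== SOURCE A (Python) =====
-- UNIT_NAMES = {
--     # Infantry
--     10141: 'Infantry',
--     3294: 'Motorized Infantry',
--     3272: 'National Guard',
--     3286: 'Mechanized Infantry',
--     3300: 'Naval Infantry',
--     3314: 'Airborne Infantry',
--     3328: 'Special Forces',
--     3342: 'Mercenaries',
--     # Armored
--     3229: 'Combat Recon Vehicle',
--     3243: 'Armored Fighting Vehicle',
--     3257: 'Amphibious Combat Vehicle',
--     3260: 'Main Battle Tank',
--     3322: 'MBT',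
--     3271: 'Tank Destroyer',
--     # Support
--     3336: 'Mobile Artillery',
--     3350: 'MLRS',
--     3373: 'SAM Launcher',
--     3385: 'Theater Defense System',
--     # Helicopters
--     3308: 'Attack Helicopter',
--     3399: 'Gunship Helicopter',
--     3413: 'ASW Helicopter',
--     # Fighters
--     3387: 'Strike Fighter',
--     3401: 'Air Superiority Fighter',
--     3415: 'AWACS',
--     3429: 'Naval Strike Fighter',
--     # Heavies
--     3443: 'Strategic Bomber',
--     3457: 'Stealth Bomber',
--     # Naval
--     3471: 'Corvette',
--     3485: 'Frigate',
--     3499: 'Destroyer',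
--     3513: 'Cruiser',
--     3527: 'Aircraft Carrier',
--     3541: 'Amphibious Assault Ship',
--     3555: 'Supply Ship',
--     # Submarines
--     3569: 'Attack Submarine',
--     3583: 'Ballistic Missile Submarine',
--     # Missiles
--     3364: 'Cruise Missile',
--     3378: 'Ballistic Missile',
--     3392: 'ICBM',
--     # Transport / Misc
--     3597: 'Transport',
--     3611: 'Supply Truck',
--     # Unknown (seen in live game)
--     4689: 'Unknown Unit T4689',
-- }
--
-- def resolve_unit_type(name_or_id):
--     """Resolve a unit name or type ID to (type_id, name).
--
--     Accepts: int type_id, str type_id, or partial name match.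
--     Returns (type_id, name) or (None, None) if not found.
--     """
--     if isinstance(name_or_id, int):
--         n = UNIT_NAMES.get(name_or_id)
--         return (name_or_id, n) if n else (None, None)
--     s = str(name_or_id).strip()
--     if s.isdigit():
--         tid = int(s)
--         n = UNIT_NAMES.get(tid)
--         return (tid, n) if n else (None, None)
--     sl = s.lower()
--     for tid, n in UNIT_NAMES.items():
--         if n.lower() == sl:
--             return (tid, n)
--     for tid, n in UNIT_NAMES.items():
--         if sl in n.lower():
--             return (tid, n)
--     return (None, None)
-- ===== SOURCE B (Python) =====
-- UNIT_NAMES = {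
--     10141: 'Infantry', 3294: 'Motorized Infantry', 3272: 'National Guard',
--     3286: 'Mechanized Infantry', 3300: 'Naval Infantry', 3314: 'Airborne Infantry',
--     3328: 'Special Forces', 3342: 'Mercenaries',
--     3229: 'Combat Recon Vehicle', 3243: 'Armored Fighting Vehicle',
--     3257: 'Amphibious Combat Vehicle', 3260: 'Main Battle Tank', 3322: 'MBT',
--     3271: 'Tank Destroyer',
--     3336: 'Mobile Artillery', 3350: 'MLRS', 3373: 'SAM Launcher',
--     3385: 'Theater Defense System',
--     3308: 'Attack Helicopter', 3399: 'Gunship Helicopter', 3413: 'ASW Helicopter',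
--     3387: 'Strike Fighter', 3401: 'Air Superiority Fighter', 3415: 'AWACS',
--     3429: 'Naval Strike Fighter',
--     3443: 'Strategic Bomber', 3457: 'Stealth Bomber',
--     3471: 'Corvette', 3485: 'Frigate', 3499: 'Destroyer', 3513: 'Cruiser',
--     3527: 'Aircraft Carrier', 3541: 'Amphibious Assault Ship', 3555: 'Supply Ship',
--     3569: 'Attack Submarine', 3583: 'Ballistic Missile Submarine',
--     3364: 'Cruise Missile', 3378: 'Ballistic Missile', 3392: 'ICBM',
--     3597: 'Transport', 3611: 'Supply Truck',
--     4689: 'Unknown Unit T4689',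
-- }
--
-- def resolve_unit_type(name_or_id):
--     """Resolve a unit name or type ID to (type_id, name) in one pass."""
--     if isinstance(name_or_id, int):
--         n = UNIT_NAMES.get(name_or_id)
--         return (name_or_id, n) if n else (None, None)
--     s = str(name_or_id).strip()
--     if s.isdigit():
--         tid = int(s)
--         n = UNIT_NAMES.get(tid)
--         return (tid, n) if n else (None, None)
--     sl = s.lower()
--     fallback = None
--     for tid, n in UNIT_NAMES.items():
--         nl = n.lower()
--         if nl == sl:
--             return (tid, n)
--         if fallback is None and sl in nl:
--             fallback = (tid, n)
--     return fallback if fallback is not None else (None, None)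
-- ===== Notes on version B (the rewrite author's own statement) =====
-- stated objective: alternative
-- what changed: The two full scans over UNIT_NAMES (exact-match pass, then partial-match pass) are fused into a single traversal that returns immediately on an exact case-insensitive match and remembers the first partial match in a fallback variable.
import Mathlib
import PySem

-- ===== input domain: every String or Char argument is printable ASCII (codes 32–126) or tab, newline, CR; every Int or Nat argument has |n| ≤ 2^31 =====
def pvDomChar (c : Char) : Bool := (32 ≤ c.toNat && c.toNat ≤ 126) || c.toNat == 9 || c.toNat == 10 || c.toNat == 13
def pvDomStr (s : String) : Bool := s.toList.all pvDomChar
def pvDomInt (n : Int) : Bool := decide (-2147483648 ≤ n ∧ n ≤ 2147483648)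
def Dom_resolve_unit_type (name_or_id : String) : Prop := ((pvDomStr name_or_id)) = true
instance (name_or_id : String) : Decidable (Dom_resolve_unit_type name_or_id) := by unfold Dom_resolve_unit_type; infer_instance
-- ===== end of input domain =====

-- B fuses A's two scans (exact pass, then partial pass) into one traversal with a first-partial fallback accumulator; objective: alternative (same cost).

-- ===== PORT A =====
-- UNIT_NAMES as an association list in insertion order (shared module constant of both programs)
def unitNames : List (Int × String) :=
  [(10141, "Infantry"), (3294, "Motorized Infantry"), (3272, "National Guard"),
   (3286, "Mechanized Infantry"), (3300, "Naval Infantry"), (3314, "Airborne Infantry"),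
   (3328, "Special Forces"), (3342, "Mercenaries"),
   (3229, "Combat Recon Vehicle"), (3243, "Armored Fighting Vehicle"),
   (3257, "Amphibious Combat Vehicle"), (3260, "Main Battle Tank"), (3322, "MBT"),
   (3271, "Tank Destroyer"),
   (3336, "Mobile Artillery"), (3350, "MLRS"), (3373, "SAM Launcher"),
   (3385, "Theater Defense System"),
   (3308, "Attack Helicopter"), (3399, "Gunship Helicopter"), (3413, "ASW Helicopter"),
   (3387, "Strike Fighter"), (3401, "Air Superiority Fighter"), (3415, "AWACS"),
   (3429, "Naval Strike Fighter"),
   (3443, "Strategic Bomber"), (3457, "Stealth Bomber"),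
   (3471, "Corvette"), (3485, "Frigate"), (3499, "Destroyer"), (3513, "Cruiser"),
   (3527, "Aircraft Carrier"), (3541, "Amphibious Assault Ship"), (3555, "Supply Ship"),
   (3569, "Attack Submarine"), (3583, "Ballistic Missile Submarine"),
   (3364, "Cruise Missile"), (3378, "Ballistic Missile"), (3392, "ICBM"),
   (3597, "Transport"), (3611, "Supply Truck"),
   (4689, "Unknown Unit T4689")]

-- first for-loop of A: return first exact case-insensitive name match
def aExactLoop (sl : String) : List (Int × String) → Option (Int × String)
  | [] => none
  | (tid, n) :: rest =>
      if PySem.Str.lower n == sl then some (tid, n) else aExactLoop sl rest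

-- second for-loop of A: return first partial (substring) match, else (None, None)
def aPartialLoop (sl : String) : List (Int × String) → Option Int × Option String
  | [] => (none, none)
  | (tid, n) :: rest =>
      if PySem.Str.isIn sl (PySem.Str.lower n) then (some tid, some n)
      else aPartialLoop sl rest

-- shared numeric prefix of both programs: the isinstance(int) branch cannot fire on a String argument
def resolve_unit_type (name_or_id : String) : Option Int × Option String :=
  if PySem.Str.strIsdigit (PySem.Str.strip name_or_id) then
    match PySem.Int.ofStr? (PySem.Str.strip name_or_id) with
    | some tid =>
        match (PySem.Dict.mk unitNames).get? tid with
        | some n => (some tid, some n)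
        | none => (none, none)
    | none => (none, none)  -- unreachable: isdigit (ASCII) guarantees int(s) succeeds
  else
    match aExactLoop (PySem.Str.lower (PySem.Str.strip name_or_id)) unitNames with
    | some (tid, n) => (some tid, some n)
    | none => aPartialLoop (PySem.Str.lower (PySem.Str.strip name_or_id)) unitNames

-- ===== PORT B =====
-- single loop: return on exact match, remember first partial match in fallback
def bGo (sl : String) : List (Int × String) → Option (Int × String) → Option Int × Option String
  | [], fb =>
      match fb with
      | some (tid, n) => (some tid, some n)
      | none => (none, none)
  | (tid, n) :: rest, fb =>
      let nl := PySem.Str.lower n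
      if nl == sl then (some tid, some n)
      else bGo sl rest (if fb.isNone && PySem.Str.isIn sl nl then some (tid, n) else fb)

def resolve_unit_type_alt (name_or_id : String) : Option Int × Option String :=
  if PySem.Str.strIsdigit (PySem.Str.strip name_or_id) then
    match PySem.Int.ofStr? (PySem.Str.strip name_or_id) with
    | some tid =>
        match (PySem.Dict.mk unitNames).get? tid with
        | some n => (some tid, some n)
        | none => (none, none)
    | none => (none, none)  -- unreachable: isdigit (ASCII) guarantees int(s) succeeds
  else
    bGo (PySem.Str.lower (PySem.Str.strip name_or_id)) unitNames none

-- ===== PRECONDITION & SPEC =====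
def Spec_resolve_unit_type (name_or_id : String) (out : Option Int × Option String) : Prop := out = resolve_unit_type_alt name_or_id
instance (name_or_id : String) (out : Option Int × Option String) : Decidable (Spec_resolve_unit_type name_or_id out) := by unfold Spec_resolve_unit_type; infer_instance

-- ===== CLAIM (what is proved, stated in full; the proofs are below) =====
def Claim_equal_resolve_unit_type : Prop := ∀ (name_or_id : String), Dom_resolve_unit_type name_or_id → Spec_resolve_unit_type name_or_id (resolve_unit_type name_or_id)

-- ===== LEMMAS AND PROOFS =====
-- one-pass loop with fallback = exact pass, then stored fallback, then partial pass
theorem bGo_eq (sl : String) (l : List (Int × String)) (fb : Option (Int × String)) :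
    bGo sl l fb =
      match aExactLoop sl l with
      | some (tid, n) => (some tid, some n)
      | none =>
          match fb with
          | some (tid, n) => (some tid, some n)
          | none => aPartialLoop sl l := by
  induction l generalizing fb with
  | nil => cases fb <;> rfl
  | cons p rest ih =>
      obtain ⟨tid, n⟩ := p
      cases hb : (PySem.Str.lower n == sl) with
      | true => simp [bGo, aExactLoop, hb]
      | false =>
          rw [show bGo sl ((tid, n) :: rest) fb
                = bGo sl rest (if fb.isNone && PySem.Str.isIn sl (PySem.Str.lower n) then some (tid, n) else fb)
              from by simp [bGo, hb]]
          rw [ih]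
          cases fb with
          | some q => simp [aExactLoop, hb]
          | none =>
              cases hc : PySem.Chars.isIn sl.toList (PySem.Chars.lower n.toList) with
              | true => simp [aExactLoop, aPartialLoop, hb, hc]
              | false => simp [aExactLoop, aPartialLoop, hb, hc]

-- ===== VERDICT (by name: the statement is the Claim_ definition above) =====
theorem resolve_unit_type_spec : Claim_equal_resolve_unit_type := by
  intro s _
  unfold Spec_resolve_unit_type resolve_unit_type resolve_unit_type_alt
  by_cases h : PySem.Str.strIsdigit (PySem.Str.strip s) = true
  · rw [if_pos h, if_pos h]
  · rw [if_neg h, if_neg h, bGo_eq]
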